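-- pv_equiv track=rewrite | github.com/3xplOs1v3/moro | untitled3.py | trios
-- ===== SOURCE A (Python) =====
-- def trios(n):
--     res = []
--     for i in range(n+1):
--         for j in range(n+1):
--             for k in range(n+1):
--                 if i+j+k==n:
--                     res.append([i,j,k])
--     return res
-- ===== SOURCE B (Python) =====
-- def trios(n):
--     res = []
--     i = j = 0
--     while i <= n:
--         res.append([i, j, n - i - j])
--         if j < n - i:
--             j += 1
--         else:
--             i += 1
--             j = 0
--     return res
-- ===== Notes on version B (the rewrite author's own statement) =====
-- stated objective: faster
-- what changed: Replaces the cubic triple nested scan with a single while loop over a two-counter state (i,j) that emits [i, j, n-i-j] and advances the counters odometer-style.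
import Mathlib
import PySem

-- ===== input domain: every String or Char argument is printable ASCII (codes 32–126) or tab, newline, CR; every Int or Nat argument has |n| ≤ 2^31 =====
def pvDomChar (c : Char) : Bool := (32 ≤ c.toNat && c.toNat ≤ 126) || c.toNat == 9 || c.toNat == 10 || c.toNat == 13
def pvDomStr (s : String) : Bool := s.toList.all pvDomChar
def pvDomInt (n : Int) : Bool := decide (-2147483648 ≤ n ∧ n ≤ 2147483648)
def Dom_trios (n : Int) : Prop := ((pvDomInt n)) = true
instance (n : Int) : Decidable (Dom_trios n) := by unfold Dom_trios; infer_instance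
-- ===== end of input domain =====

-- B replaces A's cubic triple nested scan by a single two-counter odometer loop emitting [i, j, n-i-j] (asymptotically faster).

-- ===== PORT A =====
def trios (n : Int) : List (List Int) :=
  (PySem.List.pyRange 0 (n+1) 1).foldl (fun res i =>
    (PySem.List.pyRange 0 (n+1) 1).foldl (fun res j =>
      (PySem.List.pyRange 0 (n+1) 1).foldl (fun res k =>
        if i + j + k = n then res ++ [[i, j, k]] else res) res) res) []

-- ===== PORT B =====
-- the while loop of Source B: state (i, j); emits one triple per step, then advances
-- j within the row or moves to the next row
def triosGo (n i j : Int) : List (List Int) :=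
  if h : i ≤ n then
    [i, j, n - i - j] ::
      (if hj : j < n - i then triosGo n i (j + 1) else triosGo n (i + 1) 0)
  else []
termination_by ((n + 1 - i).toNat, (n - i - j).toNat)
decreasing_by
  · right; omega
  · left; omega

def trios_alt (n : Int) : List (List Int) := triosGo n 0 0

-- ===== PRECONDITION & SPEC =====
def Spec_trios (n : Int) (out : List (List Int)) : Prop := out = trios_alt n
instance (n : Int) (out : List (List Int)) : Decidable (Spec_trios n out) := by unfold Spec_trios; infer_instance

-- ===== CLAIM (what is proved, stated in full; the proofs are below) =====
def Claim_equal_trios : Prop := ∀ (n : Int), Dom_trios n → Spec_trios n (trios n)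

-- ===== LEMMAS AND PROOFS =====

theorem pv_filter_eq_of_nodup (l : List Int) (c : Int) (hl : l.Nodup) :
    l.filter (fun k => decide (k = c)) = if c ∈ l then [c] else [] := by
  induction l with
  | nil => simp
  | cons x xs ih =>
    rcases List.nodup_cons.mp hl with ⟨hx, hxs⟩
    by_cases hxc : x = c
    · subst hxc
      simp [ih hxs, hx]
    · simp [hxc, ih hxs, Ne.symm hxc]

theorem pv_flatMap_eq_map {α β : Type} (l : List α) (g : α → List β) (f : α → β)
    (h : ∀ x ∈ l, g x = [f x]) : l.flatMap g = l.map f := by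
  induction l with
  | nil => simp
  | cons x xs ih =>
    simp only [List.flatMap_cons, List.map_cons, h x (List.mem_cons_self),
      ih fun y hy => h y (List.mem_cons_of_mem _ hy)]
    rfl

theorem pv_flatMap_eq_nil {α β : Type} (l : List α) (g : α → List β)
    (h : ∀ x ∈ l, g x = []) : l.flatMap g = [] := by
  induction l with
  | nil => simp
  | cons x xs ih =>
    simp [List.flatMap_cons, h x (List.mem_cons_self),
      ih fun y hy => h y (List.mem_cons_of_mem _ hy)]

theorem pv_flatMap_congr {α β : Type} (l : List α) (f g : α → List β)
    (h : ∀ x ∈ l, f x = g x) : l.flatMap f = l.flatMap g := by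
  induction l with
  | nil => rfl
  | cons x xs ih =>
    simp [List.flatMap_cons, h x (List.mem_cons_self),
      ih fun y hy => h y (List.mem_cons_of_mem _ hy)]

-- A's inner two loops, for a fixed i in range, emit exactly row i of the triangle
theorem pv_inner (n i : Int) (hi0 : 0 ≤ i) (hi : i < n + 1) :
    (PySem.List.pyRange 0 (n+1) 1).flatMap (fun j =>
      ((PySem.List.pyRange 0 (n+1) 1).filter (fun k => decide (i + j + k = n))).map
        (fun k => [i, j, k]))
    = (PySem.List.pyRange 0 (n+1-i) 1).map (fun j => [i, j, n - i - j]) := by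
  have hfil : ∀ j : Int,
      (PySem.List.pyRange 0 (n+1) 1).filter (fun k => decide (i + j + k = n)) =
        if (n - i - j) ∈ PySem.List.pyRange 0 (n+1) 1 then [n - i - j] else [] := by
    intro j
    rw [← pv_filter_eq_of_nodup _ _ (PySem.List.nodup_pyRange_one 0 (n+1))]
    apply List.filter_congr
    intro k _
    simp only [decide_eq_decide]
    omega
  simp only [hfil, PySem.List.mem_pyRange_one]
  rw [PySem.List.pyRange_one_append 0 (n+1-i) (n+1) (by omega) (by omega), List.flatMap_append]
  have h1 : (PySem.List.pyRange 0 (n+1-i) 1).flatMap (fun j =>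
      (if 0 ≤ n - i - j ∧ n - i - j < n + 1 then [n - i - j] else []).map
        (fun k => [i, j, k]))
      = (PySem.List.pyRange 0 (n+1-i) 1).map (fun j => [i, j, n - i - j]) := by
    apply pv_flatMap_eq_map
    intro j hj
    rw [PySem.List.mem_pyRange_one] at hj
    rw [if_pos (by omega : 0 ≤ n - i - j ∧ n - i - j < n + 1)]
    simp
  have h2 : (PySem.List.pyRange (n+1-i) (n+1) 1).flatMap (fun j =>
      (if 0 ≤ n - i - j ∧ n - i - j < n + 1 then [n - i - j] else []).map
        (fun k => [i, j, k])) = [] := by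
    apply pv_flatMap_eq_nil
    intro j hj
    rw [PySem.List.mem_pyRange_one] at hj
    rw [if_neg (by omega : ¬ (0 ≤ n - i - j ∧ n - i - j < n + 1))]
    simp
  rw [h1, h2, List.append_nil]

-- A in flatMap/row form
theorem pv_trios_rows (n : Int) :
    trios n = (PySem.List.pyRange 0 (n+1) 1).flatMap
      (fun i => (PySem.List.pyRange 0 (n+1-i) 1).map (fun j => [i, j, n - i - j])) := by
  unfold trios
  simp only [PySem.List.foldl_append_ite, PySem.List.foldl_append_eq_flatMap,
    List.nil_append]
  apply pv_flatMap_congr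
  intro i hi
  rw [PySem.List.mem_pyRange_one] at hi
  exact pv_inner n i hi.1 hi.2

-- characterisation of B's loop: from state (i, j) with 0 ≤ j ≤ n - i it emits
-- the rest of row i and then all later rows
theorem pv_triosGo_eq (n i j : Int) : 0 ≤ j → j ≤ n - i →
    triosGo n i j =
      (PySem.List.pyRange j (n+1-i) 1).map (fun j' => [i, j', n - i - j']) ++
      (PySem.List.pyRange (i+1) (n+1) 1).flatMap
        (fun i' => (PySem.List.pyRange 0 (n+1-i') 1).map (fun j' => [i', j', n - i' - j'])) := by
  induction i, j using triosGo.induct n with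
  | case1 i j h ihj ihi =>
    intro h0 hle
    rw [triosGo, dif_pos h]
    by_cases hj : j < n - i
    · rw [dif_pos hj, ihj hj (by omega) (by omega),
        PySem.List.pyRange_one_cons (by omega : j < n + 1 - i), List.map_cons]
      rfl
    · have hje : j = n - i := by omega
      rw [dif_neg hj,
        PySem.List.pyRange_one_cons (by omega : j < n + 1 - i),
        PySem.List.pyRange_one_eq_nil (by omega : n + 1 - i ≤ j + 1), List.map_cons,
        List.map_nil]
      by_cases hin : i + 1 ≤ n
      · rw [ihi (by omega) (by omega),
          PySem.List.pyRange_one_cons (by omega : i + 1 < n + 1), List.flatMap_cons]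
        simp only [List.cons_append, List.nil_append]
      · rw [triosGo, dif_neg (by omega : ¬ i + 1 ≤ n),
          PySem.List.pyRange_one_eq_nil (by omega : n + 1 ≤ i + 1)]
        simp only [List.flatMap_nil, List.append_nil]
  | case2 i j h =>
    intro h0 hle
    omega

-- ===== VERDICT (by name: the statement is the Claim_ definition above) =====
theorem trios_spec : Claim_equal_trios := by
  intro n _
  unfold Spec_trios trios_alt
  rw [pv_trios_rows]
  by_cases hn : 0 ≤ n
  · rw [pv_triosGo_eq n 0 0 le_rfl (by omega),
      PySem.List.pyRange_one_cons (by omega : (0:Int) < n + 1), List.flatMap_cons]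
  · rw [PySem.List.pyRange_one_eq_nil (by omega : n + 1 ≤ 0), List.flatMap_nil]
    rw [triosGo, dif_neg (by omega : ¬ (0:Int) ≤ n)]
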